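-- pv_equiv track=rewrite | github.com/forgeters/zotero-fig | tools/pdf_probe.py | get_missing_sequence_labels
-- ===== SOURCE A (Python) =====
-- def get_missing_sequence_labels(kind: str, numbers: list[int]) -> list[str]:
--     missing: list[str] = []
--     available = set(numbers)
--     max_number = numbers[-1] if numbers else 0
--     prefix = "Figure" if kind == "figure" else "Table"
--     for number in range(1, max_number + 1):
--         if number not in available:
--             missing.append(f"{prefix} {number}")
--     return missing
-- ===== SOURCE B (Python) =====
-- def get_missing_sequence_labels(kind: str, numbers: list[int]) -> list[str]:
--     prefix = "Figure" if kind == "figure" else "Table"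
--     limit = numbers[-1] if numbers else 0
--     out: list[str] = []
--     prev = 0
--     for n in sorted(set(numbers)):
--         if prev < n <= limit:
--             out.extend(f"{prefix} {k}" for k in range(prev + 1, n))
--             prev = n
--     out.extend(f"{prefix} {k}" for k in range(prev + 1, limit + 1))
--     return out
-- ===== Notes on version B (the rewrite author's own statement) =====
-- stated objective: alternative
-- what changed: Replaces the per-candidate membership loop (test every 1..numbers[-1] against a set) with sort-then-scan gap detection: sort the distinct present numbers once and emit each gap of absent values between consecutive present ones (plus the tail gap up to numbers[-1]); no membership test is ever performed.
import Mathlib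
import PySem

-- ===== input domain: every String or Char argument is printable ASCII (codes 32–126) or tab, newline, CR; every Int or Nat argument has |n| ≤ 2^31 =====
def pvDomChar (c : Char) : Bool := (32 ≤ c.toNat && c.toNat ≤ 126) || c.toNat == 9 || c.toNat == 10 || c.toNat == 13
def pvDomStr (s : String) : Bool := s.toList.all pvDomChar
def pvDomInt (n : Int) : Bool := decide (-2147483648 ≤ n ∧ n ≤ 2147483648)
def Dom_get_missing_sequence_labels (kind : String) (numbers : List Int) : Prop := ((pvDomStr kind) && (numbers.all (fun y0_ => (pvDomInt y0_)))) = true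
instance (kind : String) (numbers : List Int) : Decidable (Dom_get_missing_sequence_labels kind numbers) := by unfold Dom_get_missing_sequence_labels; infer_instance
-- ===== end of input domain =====

-- B replaces A's per-candidate membership loop with sort-then-scan gap detection over the
-- distinct present numbers (no membership test at all) — an alternative algorithm, same output.


-- ===== PORT A =====
def get_missing_sequence_labels (kind : String) (numbers : List Int) : List String :=
  let available : PySem.Set Int := PySem.Set.ofList numbers
  let max_number : Int := if numbers.isEmpty then 0 else (PySem.List.pyGet? numbers (-1)).getD 0
  let prefix_ : String := if kind == "figure" then "Figure" else "Table"
  (PySem.List.pyRange 1 (max_number + 1)).foldl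
    (fun missing number =>
      if PySem.Set.contains available number then missing
      else missing ++ [prefix_ ++ " " ++ PySem.Int.toStr number]) []

-- ===== PORT B =====
def get_missing_sequence_labels_alt (kind : String) (numbers : List Int) : List String :=
  let prefix_ : String := if kind == "figure" then "Figure" else "Table"
  let limit : Int := if numbers.isEmpty then 0 else (PySem.List.pyGet? numbers (-1)).getD 0
  let lab : Int → String := fun k => prefix_ ++ " " ++ PySem.Int.toStr k
  let st := (PySem.List.sorted (PySem.Set.ofList numbers) (fun x => x)).foldl
    (fun (st : List String × Int) n =>
      if st.2 < n ∧ n ≤ limit then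
        (st.1 ++ (PySem.List.pyRange (st.2 + 1) n).map lab, n)
      else st) ([], 0)
  st.1 ++ (PySem.List.pyRange (st.2 + 1) (limit + 1)).map lab

-- ===== PRECONDITION & SPEC =====
def Spec_get_missing_sequence_labels (kind : String) (numbers : List Int) (out : List String) : Prop := out = get_missing_sequence_labels_alt kind numbers
instance (kind : String) (numbers : List Int) (out : List String) : Decidable (Spec_get_missing_sequence_labels kind numbers out) := by unfold Spec_get_missing_sequence_labels; infer_instance

-- ===== CLAIM (what is proved, stated in full; the proofs are below) =====
def Claim_equal_get_missing_sequence_labels : Prop := ∀ (kind : String) (numbers : List Int), Dom_get_missing_sequence_labels kind numbers → Spec_get_missing_sequence_labels kind numbers (get_missing_sequence_labels kind numbers)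

-- ===== LEMMAS AND PROOFS =====

-- B's gap scan over a strictly increasing list L equals filtering the whole range by non-membership in L.
theorem gapscan (f : Int → String) (limit : Int) :
    ∀ (L : List Int), L.Pairwise (· < ·) → ∀ (p : Int) (acc : List String),
    (L.foldl (fun (st : List String × Int) n =>
        if st.2 < n ∧ n ≤ limit then
          (st.1 ++ (PySem.List.pyRange (st.2 + 1) n).map f, n)
        else st) (acc, p)).1
      ++ (PySem.List.pyRange ((L.foldl (fun (st : List String × Int) n =>
        if st.2 < n ∧ n ≤ limit then
          (st.1 ++ (PySem.List.pyRange (st.2 + 1) n).map f, n)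
        else st) (acc, p)).2 + 1) (limit + 1)).map f
    = acc ++ ((PySem.List.pyRange (p + 1) (limit + 1)).filter (fun x => !L.contains x)).map f := by
  intro L
  induction L with
  | nil => intro _ p acc; simp
  | cons n t ih =>
    intro hpw p acc
    have hgt : ∀ x ∈ t, n < x := fun x hx => List.rel_of_pairwise_cons hpw hx
    have hpt : t.Pairwise (· < ·) := hpw.of_cons
    by_cases h : p < n ∧ n ≤ limit
    · simp only [List.foldl_cons, if_pos h]
      rw [ih hpt n (acc ++ (PySem.List.pyRange (p + 1) n).map f)]
      rw [PySem.List.pyRange_one_append (p + 1) n (limit + 1) (by omega) (by omega),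
          PySem.List.pyRange_one_cons (show n < limit + 1 by omega),
          List.filter_append, List.filter_cons]
      rw [if_neg (by simp : ¬ ((!(n :: t).contains n) = true))]
      have h1 : (PySem.List.pyRange (p + 1) n).filter (fun x => !(n :: t).contains x)
          = PySem.List.pyRange (p + 1) n := by
        apply List.filter_eq_self.mpr
        intro x hx
        have hb := PySem.List.mem_pyRange_one.mp hx
        have hxt : x ∉ t := fun hc => absurd (hgt x hc) (by omega)
        simp [(show ¬ x = n by omega), hxt]
      have h2 : (PySem.List.pyRange (n + 1) (limit + 1)).filter (fun x => !(n :: t).contains x)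
          = (PySem.List.pyRange (n + 1) (limit + 1)).filter (fun x => !t.contains x) := by
        apply List.filter_congr
        intro x hx
        have hb := PySem.List.mem_pyRange_one.mp hx
        simp [(show ¬ x = n by omega)]
      rw [h1, h2]
      simp
    · simp only [List.foldl_cons, if_neg h]
      rw [ih hpt p acc]
      congr 1
      congr 1
      apply List.filter_congr
      intro x hx
      have hb := PySem.List.mem_pyRange_one.mp hx
      simp [(show ¬ x = n by omega)]

-- ===== VERDICT (by name: the statement is the Claim_ definition above) =====
theorem get_missing_sequence_labels_spec : Claim_equal_get_missing_sequence_labels := by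
  intro kind numbers _
  show get_missing_sequence_labels kind numbers = get_missing_sequence_labels_alt kind numbers
  unfold get_missing_sequence_labels get_missing_sequence_labels_alt
  set limit : Int := if numbers.isEmpty then 0 else (PySem.List.pyGet? numbers (-1)).getD 0 with hlim
  set prefix_ : String := if kind == "figure" then "Figure" else "Table" with hpre
  set f : Int → String := fun k => prefix_ ++ " " ++ PySem.Int.toStr k with hf
  -- A's loop is the filtered range, mapped
  have hA : (PySem.List.pyRange 1 (limit + 1)).foldl
      (fun missing number =>
        if PySem.Set.contains (PySem.Set.ofList numbers) number then missing
        else missing ++ [f number]) []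
      = ((PySem.List.pyRange 1 (limit + 1)).filter
          (fun x => !PySem.Set.contains (PySem.Set.ofList numbers) x)).map f := by
    have hflip := PySem.List.foldl_congr_mem
      (l := PySem.List.pyRange 1 (limit + 1)) (init := ([] : List String))
      (f := fun missing number =>
        if PySem.Set.contains (PySem.Set.ofList numbers) number then missing
        else missing ++ [f number])
      (g := fun missing number =>
        if (!PySem.Set.contains (PySem.Set.ofList numbers) number) = true then missing ++ [f number]
        else missing)
      (by intro acc x _; cases PySem.Set.contains (PySem.Set.ofList numbers) x <;> simp)
    rw [hflip, PySem.List.foldl_append_if]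
    simp
  rw [hA]
  -- B's gap scan over the sorted distinct numbers
  have hpw := PySem.List.sorted_ofList_pairwise_lt (xs := numbers)
  have hB := gapscan f limit (PySem.List.sorted (PySem.Set.ofList numbers) (fun x => x)) hpw 0 []
  simp only [zero_add] at hB
  rw [hB]
  -- the two membership tests agree
  congr 1
  apply List.filter_congr
  intro x _
  have hmem : x ∈ PySem.List.sorted (PySem.Set.ofList numbers) (fun x => x) ↔
      x ∈ PySem.Set.ofList numbers := PySem.List.mem_sorted _ _ _ _
  by_cases hx : x ∈ PySem.Set.ofList numbers
  · simp [PySem.Set.contains, hx, hmem.mpr hx]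
  · simp [PySem.Set.contains, hx, hmem]
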